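-- pv_equiv track=rewrite | github.com/cabinrentalsofgeorgia-bit/Fortress-Prime | crog-ai-backend/app/signals/promotion_review.py | _transition_groups
-- ===== SOURCE A (Python) =====
-- from typing import Any
--
-- def _transition_groups(rows: list[dict[str, Any]]) -> dict[str, list[dict[str, Any]]]:
--     grouped: dict[str, list[dict[str, Any]]] = {}
--     for row in rows:
--         ticker = str(row.get("ticker", "")).upper()
--         if not ticker:
--             continue
--         grouped.setdefault(ticker, []).append(row)
--     return grouped
-- ===== SOURCE B (Python) =====
-- from typing import Any
--
-- def _transition_groups(rows: list[dict[str, Any]]) -> dict[str, list[dict[str, Any]]]: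
--     keyed = [(str(r.get("ticker", "")).upper(), r) for r in rows]
--     keys: list[str] = []
--     for k, _r in keyed:
--         if k and k not in keys:
--             keys.append(k)
--     return {k: [r for kk, r in keyed if kk == k] for k in keys}
-- ===== Notes on version B (the rewrite author's own statement) =====
-- stated objective: alternative
-- what changed: Replaces the single hash-insertion pass (dict.setdefault(...).append) by a key-precomputation pass, an explicit first-occurrence key list, and one comprehension per key that filters the keyed rows (nested-scan grouping instead of incremental dict building).
import Mathlib
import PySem

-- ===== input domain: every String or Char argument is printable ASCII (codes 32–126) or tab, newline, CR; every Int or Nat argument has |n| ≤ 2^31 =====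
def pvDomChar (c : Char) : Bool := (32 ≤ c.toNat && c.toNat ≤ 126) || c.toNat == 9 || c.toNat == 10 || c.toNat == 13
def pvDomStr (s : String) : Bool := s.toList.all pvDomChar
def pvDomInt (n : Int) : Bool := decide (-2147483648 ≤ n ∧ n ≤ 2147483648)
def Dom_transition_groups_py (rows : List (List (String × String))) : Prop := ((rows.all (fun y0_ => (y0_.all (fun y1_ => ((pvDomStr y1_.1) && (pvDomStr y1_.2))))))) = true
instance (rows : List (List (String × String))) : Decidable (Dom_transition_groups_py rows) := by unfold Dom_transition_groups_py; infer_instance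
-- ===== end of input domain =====

-- B groups rows by uppercase ticker via a precomputed key list and one filter per distinct key,
-- instead of A's incremental dict-of-lists; same return value, no speed claim.

-- str(row.get("ticker", "")).upper()  (shared by both ports, same expression in both Pythons)
def pvTicker (row : List (String × String)) : String :=
  PySem.Str.upper ((PySem.Dict.mk row).getD "ticker" "")

-- ===== PORT A =====
def transition_groups_py (rows : List (List (String × String))) : List (String × List (List (String × String))) :=
  (rows.foldl
    (fun g row =>
      let t := pvTicker row
      if t == "" then g
      else g.modify t [] (fun v => v ++ [row]))
    (PySem.Dict.empty : PySem.Dict String (List (List (String × String))))).items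

-- ===== PORT B =====
def transition_groups_py_alt (rows : List (List (String × String))) : List (String × List (List (String × String))) :=
  let keyed := rows.map (fun r => (pvTicker r, r))
  let keys := keyed.foldl
    (fun ks p => if p.1 != "" && !(ks.contains p.1) then ks ++ [p.1] else ks)
    ([] : List String)
  keys.map (fun k => (k, (keyed.filter (fun p => p.1 == k)).map (fun p => p.2)))

-- ===== PRECONDITION & SPEC =====
def Spec_transition_groups_py (rows : List (List (String × String))) (out : List (String × List (List (String × String)))) : Prop := out = transition_groups_py_alt rows
instance (rows : List (List (String × String))) (out : List (String × List (List (String × String)))) : Decidable (Spec_transition_groups_py rows out) := by unfold Spec_transition_groups_py; infer_instance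

-- ===== CLAIM (what is proved, stated in full; the proofs are below) =====
def Claim_equal_transition_groups_py : Prop := ∀ (rows : List (List (String × String))), Dom_transition_groups_py rows → Spec_transition_groups_py rows (transition_groups_py rows)

-- ===== LEMMAS AND PROOFS =====

-- A's loop over rows equals the grouping fold over the nonempty-key keyed pairs.
theorem pv_foldA_eq (rows : List (List (String × String)))
    (d : PySem.Dict String (List (List (String × String)))) :
    rows.foldl
      (fun g row =>
        let t := pvTicker row
        if t == "" then g
        else g.modify t [] (fun v => v ++ [row])) d
    = ((rows.map (fun r => (pvTicker r, r))).filter (fun p => p.1 != "")).foldl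
        (fun g p => g.modify p.1 [] (fun v => v ++ [p.2])) d := by
  induction rows generalizing d with
  | nil => rfl
  | cons r rs ih =>
    simp only [List.foldl_cons, List.map_cons, List.filter_cons]

    by_cases h : (pvTicker r == "") = true
    · have hb : (pvTicker r != "") = false := by simp [bne, h]
      rw [if_pos h, hb]
      simp only [Bool.false_eq_true, if_false]
      exact ih d
    · have hb : (pvTicker r != "") = true := by simpa [bne] using h
      rw [if_neg h, hb]
      simp only [if_true, List.foldl_cons]
      exact ih _

-- the 'if not contains then append' step is PySem.Set.add
theorem pv_add_eq (ks : List String) (x : String) :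
    (if !ks.contains x then ks ++ [x] else ks) = PySem.Set.add ks x := by
  by_cases hc : ks.contains x = true <;>
    simp [PySem.Set.add, PySem.Set.contains, hc]

-- B's key loop equals Set.update with the nonempty keys.
theorem pv_keys_eq (keyed : List (String × List (String × String))) (ks : List String) :
    keyed.foldl
      (fun ks p => if p.1 != "" && !(ks.contains p.1) then ks ++ [p.1] else ks) ks
    = PySem.Set.update ks ((keyed.filter (fun p => p.1 != "")).map (fun p => p.1)) := by
  induction keyed generalizing ks with
  | nil => rfl
  | cons p ps ih =>
    simp only [List.foldl_cons, List.filter_cons]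

    by_cases h : (p.1 != "") = true
    · rw [h]
      simp only [Bool.true_and, if_true, List.map_cons]
      have hstep : PySem.Set.update ks (p.1 :: ((ps.filter (fun p => p.1 != "")).map (fun p => p.1)))
          = PySem.Set.update (PySem.Set.add ks p.1) ((ps.filter (fun p => p.1 != "")).map (fun p => p.1)) := rfl
      rw [hstep, ← pv_add_eq, ← ih]
    · have hb : (p.1 != "") = false := by simpa using h
      rw [hb]
      simp only [Bool.false_and, Bool.false_eq_true, if_false]
      exact ih ks

theorem pv_update_nil {xs : List String} :
    PySem.Set.update ([] : List String) xs = PySem.Set.ofList xs := rfl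

-- ===== VERDICT (by name: the statement is the Claim_ definition above) =====
theorem transition_groups_py_spec : Claim_equal_transition_groups_py := by
  intro rows _
  unfold Spec_transition_groups_py transition_groups_py transition_groups_py_alt
  dsimp only []
  rw [pv_foldA_eq, pv_keys_eq, pv_update_nil]
  set keyed := rows.map (fun r => (pvTicker r, r)) with hkeyed
  set l := keyed.filter (fun p => p.1 != "") with hl
  have hnd : ((l.foldl (fun g p => g.modify p.1 [] (fun v => v ++ [p.2]))
      (PySem.Dict.empty : PySem.Dict String (List (List (String × String))))).keys).Nodup :=
    PySem.Dict.nodup_keys_foldl_modify_key l (fun p => p.1) [] (fun _ p v => v ++ [p.2]) _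
      PySem.Dict.nodup_keys_empty
  rw [PySem.Dict.items_eq_map_keys _ hnd []]
  rw [PySem.Dict.keys_foldl_modify_key l (fun p => p.1) [] (fun _ p v => v ++ [p.2])]
  simp only [PySem.Dict.keys_empty, pv_update_nil]
  apply List.map_congr_left
  intro k hk
  have hk' : k ∈ l.map (fun p => p.1) := (PySem.Set.mem_ofList _ _).mp hk
  have hkne : (k != "") = true := by
    obtain ⟨p, hp, rfl⟩ := List.mem_map.mp hk'
    exact (List.mem_filter.mp hp).2
  refine Prod.ext rfl ?_
  rw [PySem.Dict.getD_foldl_modify_append l _ k, PySem.Dict.getD_empty]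
  simp only [List.nil_append, hl, List.filter_filter]
  congr 1
  apply List.filter_congr
  intro p _
  by_cases hpk : p.1 == k
  · have he : p.1 = k := by simpa using hpk
    simp [he, hkne]
  · simp [hpk]
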